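-- pv_equiv track=rewrite | github.com/Vladislav1234512345/TBankContests | contest_26_03_2025/task_G.py | max_valid_bracket_sequence
-- ===== SOURCE A (Python) =====
-- def max_valid_bracket_sequence(brackets: str):
--     n = len(brackets)
--     dp = [[0] * n for _ in range(n)]
--     parents = [[None] * n for _ in range(n)]
--
--     for length in range(2, n + 1):
--         for i in range(n - length + 1):
--             j = i + length - 1
--             if (brackets[i] == '(' and brackets[j] == ')') or \
--                (brackets[i] == '[' and brackets[j] == ']') or \
--                (brackets[i] == '{' and brackets[j] == '}'):
--                 dp[i][j] = dp[i + 1][j - 1] + 2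
--                 parents[i][j] = ('pair', i + 1, j - 1)
--
--             for k in range(i, j):
--                 if dp[i][j] < dp[i][k] + dp[k + 1][j]:
--                     dp[i][j] = dp[i][k] + dp[k + 1][j]
--                     parents[i][j] = ('split', k)
--
--
--     def reconstruct(left, right):
--         if left > right:
--             return ""
--         if parents[left][right] is None:
--             return ""
--         parent_data = parents[left][right]
--         if parent_data[0] == 'pair':
--             return brackets[left] + reconstruct(parent_data[1], parent_data[2]) + brackets[right]
--         elif parent_data[0] == 'split':
--             return reconstruct(left, parent_data[1]) + reconstruct(parent_data[1] + 1, right)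
--
--     return reconstruct(left=0, right=n - 1)
-- ===== SOURCE B (Python) =====
-- def max_valid_bracket_sequence(brackets: str):
--     n = len(brackets)
--     memo = {}
--
--     def solve(i, j):
--         # value and decision for interval [i, j]; 0/None outside the table
--         if i < 0 or j >= n or j <= i:
--             return (0, None)
--         key = (i, j)
--         if key in memo:
--             return memo[key]
--         if (brackets[i] == '(' and brackets[j] == ')') or \
--            (brackets[i] == '[' and brackets[j] == ']') or \
--            (brackets[i] == '{' and brackets[j] == '}'):
--             best = (solve(i + 1, j - 1)[0] + 2, ('pair',))
--         else:
--             best = (0, None)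
--         for k in range(i, j):
--             s = solve(i, k)[0] + solve(k + 1, j)[0]
--             if best[0] < s:
--                 best = (s, ('split', k))
--         memo[key] = best
--         return best
--
--     def reconstruct(left, right):
--         if left > right:
--             return ""
--         choice = solve(left, right)[1]
--         if choice is None:
--             return ""
--         if choice[0] == 'pair':
--             return brackets[left] + reconstruct(left + 1, right - 1) + brackets[right]
--         k = choice[1]
--         return reconstruct(left, k) + reconstruct(k + 1, right)
--
--     return reconstruct(0, n - 1)
-- ===== Notes on version B (the rewrite author's own statement) =====
-- stated objective: alternative
-- what changed: Replaces the bottom-up double loop that fills the whole dp/parents tables with an on-demand top-down memoized recursion solve(i,j) over interval endpoints (dict memo keyed by (i,j), storing value and decision), with reconstruction querying the memoized solver; same recurrence and leftmost-strict tie-break, so the exact same string is produced.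
import Mathlib
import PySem

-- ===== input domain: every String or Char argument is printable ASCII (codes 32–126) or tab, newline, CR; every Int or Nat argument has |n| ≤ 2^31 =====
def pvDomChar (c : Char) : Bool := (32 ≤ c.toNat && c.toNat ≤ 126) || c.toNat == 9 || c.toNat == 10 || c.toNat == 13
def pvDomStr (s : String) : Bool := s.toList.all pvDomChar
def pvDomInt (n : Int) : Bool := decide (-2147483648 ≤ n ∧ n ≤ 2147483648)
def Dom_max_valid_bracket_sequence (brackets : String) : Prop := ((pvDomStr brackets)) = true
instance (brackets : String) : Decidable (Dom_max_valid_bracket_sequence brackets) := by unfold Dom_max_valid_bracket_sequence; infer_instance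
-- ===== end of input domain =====

-- B replaces A's bottom-up table fill with a top-down memoized recursion over interval
-- endpoints (same recurrence and tie-breaks, same returned string); objective: alternative.

-- ===== PORT A =====

-- parents[i][j] entries: ('pair', i+1, j-1) or ('split', k)
inductive PvChoiceA : Type
  | pair : Int → Int → PvChoiceA
  | split : Int → PvChoiceA
deriving DecidableEq, Repr

-- the bracket-matching condition of both Pythons
def pvMatch (a b : Char) : Bool :=
  (a == '(' && b == ')') || (a == '[' && b == ']') || (a == '{' && b == '}')

-- functional update modelling `table[i][j] = v` on a 2-D table represented as a function
def pvUpd {α : Type} (f : Int → Int → α) (i j : Int) (v : α) : Int → Int → α :=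
  fun a b => if a = i ∧ b = j then v else f a b

-- body of A's inner `for k in range(i, j)` loop
def pvKStepA (i j : Int)
    (st : (Int → Int → Int) × (Int → Int → Option PvChoiceA)) (k : Int) :
    (Int → Int → Int) × (Int → Int → Option PvChoiceA) :=
  if st.1 i j < st.1 i k + st.1 (k + 1) j then
    (pvUpd st.1 i j (st.1 i k + st.1 (k + 1) j), pvUpd st.2 i j (some (PvChoiceA.split k)))
  else st

-- body of A's `for i in range(n - length + 1)` loop (one dp cell)
def pvCellStep (cs : List Char) (length : Int)
    (st : (Int → Int → Int) × (Int → Int → Option PvChoiceA)) (i : Int) :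
    (Int → Int → Int) × (Int → Int → Option PvChoiceA) :=
  let j := i + length - 1
  let st1 :=
    if pvMatch (PySem.List.pyGetD cs i ' ') (PySem.List.pyGetD cs j ' ') then
      (pvUpd st.1 i j (st.1 (i + 1) (j - 1) + 2),
       pvUpd st.2 i j (some (PvChoiceA.pair (i + 1) (j - 1))))
    else st
  (PySem.List.pyRange i j 1).foldl (pvKStepA i j) st1

-- body of A's `for length in range(2, n + 1)` loop
def pvLenStep (cs : List Char) (n : Int)
    (st : (Int → Int → Int) × (Int → Int → Option PvChoiceA)) (length : Int) :
    (Int → Int → Int) × (Int → Int → Option PvChoiceA) :=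
  (PySem.List.pyRange 0 (n - length + 1) 1).foldl (pvCellStep cs length) st

-- A's nested `reconstruct` (fuel only makes the recursion total; never exhausted on A's calls)
def pvReconA (cs : List Char) (par : Int → Int → Option PvChoiceA) :
    Nat → Int → Int → List Char
  | 0, _, _ => []
  | fuel + 1, left, right =>
    if right < left then []
    else
      match par left right with
      | none => []
      | some (PvChoiceA.pair a b) =>
          PySem.List.pyGetD cs left ' ' ::
            (pvReconA cs par fuel a b ++ [PySem.List.pyGetD cs right ' '])
      | some (PvChoiceA.split k) =>
          pvReconA cs par fuel left k ++ pvReconA cs par fuel (k + 1) right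

def max_valid_bracket_sequence (brackets : String) : String :=
  let cs := brackets.toList
  let n : Int := PySem.Str.len brackets
  let tabs :=
    (PySem.List.pyRange 2 (n + 1) 1).foldl (pvLenStep cs n)
      ((fun _ _ => 0), (fun _ _ => none))
  String.ofList (pvReconA cs tabs.2 (n.toNat + 1) 0 (n - 1))

-- ===== PORT B =====

-- B's recorded decisions: ('pair',) or ('split', k)
inductive PvChoiceB : Type
  | pair : PvChoiceB
  | split : Int → PvChoiceB
deriving DecidableEq, Repr

-- B's memo dict: (i, j) ↦ (value, decision)
-- B's memoized `solve`; the memo dict is threaded through (Python mutates the closure's dict);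
-- fuel only makes the recursion total and is never exhausted on B's calls
def pvSolveB (cs : List Char) (n : Int) :
    Nat → PySem.Dict (Int × Int) (Int × Option PvChoiceB) → Int → Int →
      (Int × Option PvChoiceB) × PySem.Dict (Int × Int) (Int × Option PvChoiceB)
  | 0, memo, _, _ => ((0, none), memo)
  | fuel + 1, memo, i, j =>
    if i < 0 ∨ n ≤ j ∨ j ≤ i then ((0, none), memo)
    else
      match PySem.Dict.get? memo (i, j) with
      | some v => (v, memo)
      | none =>
        let c0 :=
          if pvMatch (PySem.List.pyGetD cs i ' ') (PySem.List.pyGetD cs j ' ') then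
            let r := pvSolveB cs n fuel memo (i + 1) (j - 1)
            ((r.1.1 + 2, some PvChoiceB.pair), r.2)
          else ((0, none), memo)
        let res :=
          (PySem.List.pyRange i j 1).foldl
            (fun st k =>
              let ra := pvSolveB cs n fuel st.2 i k
              let rb := pvSolveB cs n fuel ra.2 (k + 1) j
              let s := ra.1.1 + rb.1.1
              if st.1.1 < s then ((s, some (PvChoiceB.split k)), rb.2) else (st.1, rb.2))
            c0
        (res.1, res.2.insert (i, j) res.1)

-- B's `reconstruct`, threading the memo through its `solve` calls
def pvReconB (cs : List Char) (n : Int) :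
    Nat → PySem.Dict (Int × Int) (Int × Option PvChoiceB) → Int → Int →
      List Char × PySem.Dict (Int × Int) (Int × Option PvChoiceB)
  | 0, memo, _, _ => ([], memo)
  | fuel + 1, memo, left, right =>
    if right < left then ([], memo)
    else
      let r := pvSolveB cs n (n.toNat + 1) memo left right
      match r.1.2 with
      | none => ([], r.2)
      | some PvChoiceB.pair =>
          let s1 := pvReconB cs n fuel r.2 (left + 1) (right - 1)
          (PySem.List.pyGetD cs left ' ' :: (s1.1 ++ [PySem.List.pyGetD cs right ' ']), s1.2)
      | some (PvChoiceB.split k) =>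
          let s1 := pvReconB cs n fuel r.2 left k
          let s2 := pvReconB cs n fuel s1.2 (k + 1) right
          (s1.1 ++ s2.1, s2.2)

def max_valid_bracket_sequence_alt (brackets : String) : String :=
  let cs := brackets.toList
  let n : Int := PySem.Str.len brackets
  String.ofList (pvReconB cs n (n.toNat + 1) PySem.Dict.empty 0 (n - 1)).1

-- ===== PRECONDITION & SPEC =====
def Spec_max_valid_bracket_sequence (brackets : String) (out : String) : Prop := out = max_valid_bracket_sequence_alt brackets
instance (brackets : String) (out : String) : Decidable (Spec_max_valid_bracket_sequence brackets out) := by unfold Spec_max_valid_bracket_sequence; infer_instance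

-- ===== CLAIM (what is proved, stated in full; the proofs are below) =====
def Claim_equal_max_valid_bracket_sequence : Prop := ∀ (brackets : String), Dom_max_valid_bracket_sequence brackets → Spec_max_valid_bracket_sequence brackets (max_valid_bracket_sequence brackets)

-- ===== LEMMAS AND PROOFS =====

-- the common specification: value and decision of the dp recurrence, by fuel
def pvSpecF (cs : List Char) : Nat → Int → Int → Int × Option PvChoiceA
  | 0, _, _ => (0, none)
  | fuel + 1, i, j =>
    if i < 0 ∨ (cs.length : Int) ≤ j ∨ j ≤ i then (0, none)
    else
      let base :=
        if pvMatch (PySem.List.pyGetD cs i ' ') (PySem.List.pyGetD cs j ' ') then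
          ((pvSpecF cs fuel (i + 1) (j - 1)).1 + 2, some (PvChoiceA.pair (i + 1) (j - 1)))
        else (0, none)
      (PySem.List.pyRange i j 1).foldl
        (fun best k =>
          let s := (pvSpecF cs fuel i k).1 + (pvSpecF cs fuel (k + 1) j).1
          if best.1 < s then (s, some (PvChoiceA.split k)) else best)
        base

def pvV (cs : List Char) (i j : Int) : Int × Option PvChoiceA :=
  pvSpecF cs ((j - i).toNat + 1) i j

def pvKStep (cs : List Char) (i j : Int) (best : Int × Option PvChoiceA) (k : Int) :
    Int × Option PvChoiceA :=
  let s := (pvV cs i k).1 + (pvV cs (k + 1) j).1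
  if best.1 < s then (s, some (PvChoiceA.split k)) else best

lemma pvSpecF_mono (cs : List Char) :
    ∀ (f g : Nat) (i j : Int), (j - i).toNat < f → (j - i).toNat < g →
      pvSpecF cs f i j = pvSpecF cs g i j := by
  intro f
  induction f with
  | zero => intro g i j hf; omega
  | succ f ih =>
    intro g i j hf hg
    cases g with
    | zero => omega
    | succ g =>
      simp only [pvSpecF]
      by_cases hguard : i < 0 ∨ (cs.length : Int) ≤ j ∨ j ≤ i
      · rw [if_pos hguard, if_pos hguard]
      · rw [if_neg hguard, if_neg hguard]
        have hbase :
            (if pvMatch (PySem.List.pyGetD cs i ' ') (PySem.List.pyGetD cs j ' ') then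
              ((pvSpecF cs f (i + 1) (j - 1)).1 + 2, some (PvChoiceA.pair (i + 1) (j - 1)))
            else ((0 : Int), (none : Option PvChoiceA))) =
            (if pvMatch (PySem.List.pyGetD cs i ' ') (PySem.List.pyGetD cs j ' ') then
              ((pvSpecF cs g (i + 1) (j - 1)).1 + 2, some (PvChoiceA.pair (i + 1) (j - 1)))
            else ((0 : Int), (none : Option PvChoiceA))) := by
          by_cases hm : pvMatch (PySem.List.pyGetD cs i ' ') (PySem.List.pyGetD cs j ' ')
          · rw [if_pos hm, if_pos hm, ih g (i + 1) (j - 1) (by omega) (by omega)]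
          · rw [if_neg hm, if_neg hm]
        rw [hbase]
        apply PySem.List.foldl_congr_mem
        intro acc k hk
        rw [PySem.List.mem_pyRange_one] at hk
        simp only [ih g i k (by omega) (by omega), ih g (k + 1) j (by omega) (by omega)]

lemma pvV_invalid (cs : List Char) (i j : Int)
    (h : i < 0 ∨ (cs.length : Int) ≤ j ∨ j ≤ i) : pvV cs i j = (0, none) := by
  simp only [pvV, pvSpecF, if_pos h]

lemma pvV_unfold (cs : List Char) (i j : Int) (h0 : 0 ≤ i) (h1 : j < (cs.length : Int))
    (h2 : i < j) :
    pvV cs i j =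
      (PySem.List.pyRange i j 1).foldl (pvKStep cs i j)
        (if pvMatch (PySem.List.pyGetD cs i ' ') (PySem.List.pyGetD cs j ' ') then
          ((pvV cs (i + 1) (j - 1)).1 + 2, some (PvChoiceA.pair (i + 1) (j - 1)))
        else (0, none)) := by
  have hguard : ¬(i < 0 ∨ (cs.length : Int) ≤ j ∨ j ≤ i) := by omega
  simp only [pvV, pvSpecF, if_neg hguard]
  have hbase :
      (if pvMatch (PySem.List.pyGetD cs i ' ') (PySem.List.pyGetD cs j ' ') then
        ((pvSpecF cs ((j - i).toNat) (i + 1) (j - 1)).1 + 2,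
          some (PvChoiceA.pair (i + 1) (j - 1)))
      else ((0 : Int), (none : Option PvChoiceA))) =
      (if pvMatch (PySem.List.pyGetD cs i ' ') (PySem.List.pyGetD cs j ' ') then
        ((pvV cs (i + 1) (j - 1)).1 + 2, some (PvChoiceA.pair (i + 1) (j - 1)))
      else ((0 : Int), (none : Option PvChoiceA))) := by
    by_cases hm : pvMatch (PySem.List.pyGetD cs i ' ') (PySem.List.pyGetD cs j ' ')
    · rw [if_pos hm, if_pos hm,
        pvSpecF_mono cs ((j - i).toNat) ((j - 1 - (i + 1)).toNat + 1) (i + 1) (j - 1)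
          (by omega) (by omega)]
      rfl
    · rw [if_neg hm, if_neg hm]
  rw [hbase]
  apply PySem.List.foldl_congr_mem
  intro acc k hk
  rw [PySem.List.mem_pyRange_one] at hk
  simp only [pvKStep,
    pvSpecF_mono cs ((j - i).toNat) ((k - i).toNat + 1) i k (by omega) (by omega),
    pvSpecF_mono cs ((j - i).toNat) ((j - (k + 1)).toNat + 1) (k + 1) j (by omega) (by omega)]
  rfl

-- a fold whose step only ever installs 'split' decisions cannot create a 'pair' decision
lemma pvFold_pair (step : (Int × Option PvChoiceA) → Int → (Int × Option PvChoiceA))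
    (hstep : ∀ b k, step b k = b ∨ ∃ s k', step b k = (s, some (PvChoiceA.split k'))) :
    ∀ (L : List Int) (b : Int × Option PvChoiceA) (a c : Int),
      (L.foldl step b).2 = some (PvChoiceA.pair a c) → b.2 = some (PvChoiceA.pair a c) := by
  intro L
  induction L with
  | nil => intro b a c h; exact h
  | cons k L ih =>
    intro b a c h
    rw [List.foldl_cons] at h
    have h2 := ih (step b k) a c h
    rcases hstep b k with he | ⟨s, k', he⟩
    · rw [he] at h2; exact h2
    · rw [he] at h2; simp at h2

-- a 'pair' decision can only be the base decision, which stores (i+1, j-1)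
lemma pvV_pair_eq (cs : List Char) (i j a b : Int)
    (h : (pvV cs i j).2 = some (PvChoiceA.pair a b)) : a = i + 1 ∧ b = j - 1 := by
  by_cases hguard : i < 0 ∨ (cs.length : Int) ≤ j ∨ j ≤ i
  · rw [pvV_invalid cs i j hguard] at h; simp at h
  · rw [pvV_unfold cs i j (by omega) (by omega) (by omega)] at h
    have hb := pvFold_pair (pvKStep cs i j)
      (by
        intro bb k
        simp only [pvKStep]
        by_cases hlt : bb.1 < (pvV cs i k).1 + (pvV cs (k + 1) j).1
        · right; exact ⟨_, k, by rw [if_pos hlt]⟩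
        · left; rw [if_neg hlt])
      (PySem.List.pyRange i j 1) _ a b h
    by_cases hm : pvMatch (PySem.List.pyGetD cs i ' ') (PySem.List.pyGetD cs j ' ')
    · rw [if_pos hm] at hb
      simp at hb
      exact ⟨hb.1.symm, hb.2.symm⟩
    · rw [if_neg hm] at hb
      simp at hb

-- pvUpd basics
lemma pvUpd_same {α : Type} (f : Int → Int → α) (i j : Int) (v : α) :
    pvUpd f i j v i j = v := by
  simp [pvUpd]

lemma pvUpd_other {α : Type} (f : Int → Int → α) (i j a b : Int) (v : α)
    (h : ¬(a = i ∧ b = j)) : pvUpd f i j v a b = f a b := by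
  simp [pvUpd, h]

lemma pvUpd_pvUpd {α : Type} (f : Int → Int → α) (i j : Int) (v w : α) :
    pvUpd (pvUpd f i j v) i j w = pvUpd f i j w := by
  funext a b; by_cases h : a = i ∧ b = j <;> simp [pvUpd, h]

lemma pvUpd_self {α : Type} (f : Int → Int → α) (i j : Int) (v : α) (h : f i j = v) :
    pvUpd f i j v = f := by
  funext a b; by_cases hab : a = i ∧ b = j
  · obtain ⟨rfl, rfl⟩ := hab; simp [pvUpd, h]
  · simp [pvUpd, hab]

-- the k-loop of A runs in lockstep with the spec fold
lemma pvKFoldA (cs : List Char) (i j : Int)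
    (dp : Int → Int → Int) (par : Int → Int → Option PvChoiceA)
    (hik : ∀ k, i ≤ k → k < j → dp i k = (pvV cs i k).1)
    (hkj : ∀ k, i ≤ k → k < j → dp (k + 1) j = (pvV cs (k + 1) j).1) :
    ∀ (L : List Int), (∀ k ∈ L, i ≤ k ∧ k < j) →
      ∀ (b1 : Int) (b2 : Option PvChoiceA),
      L.foldl (pvKStepA i j) (pvUpd dp i j b1, pvUpd par i j b2) =
        (pvUpd dp i j (L.foldl (pvKStep cs i j) (b1, b2)).1,
         pvUpd par i j (L.foldl (pvKStep cs i j) (b1, b2)).2) := by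
  intro L
  induction L with
  | nil => intro _ b1 b2; rfl
  | cons k L ih =>
    intro hL b1 b2
    have hk : i ≤ k ∧ k < j := hL k (List.mem_cons_self)
    have hL' : ∀ x ∈ L, i ≤ x ∧ x < j := fun x hx => hL x (List.mem_cons_of_mem k hx)
    rw [List.foldl_cons, List.foldl_cons]
    have e1 : pvUpd dp i j b1 i j = b1 := pvUpd_same dp i j b1
    have e2 : pvUpd dp i j b1 i k = dp i k := pvUpd_other dp i j i k b1 (by omega)
    have e3 : pvUpd dp i j b1 (k + 1) j = dp (k + 1) j :=
      pvUpd_other dp i j (k + 1) j b1 (by omega)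
    simp only [pvKStepA, pvKStep, e1, e2, e3, hik k hk.1 hk.2, hkj k hk.1 hk.2]
    by_cases hlt : b1 < (pvV cs i k).1 + (pvV cs (k + 1) j).1
    · rw [if_pos hlt, if_pos hlt, pvUpd_pvUpd, pvUpd_pvUpd]
      exact ih hL' ((pvV cs i k).1 + (pvV cs (k + 1) j).1) (some (PvChoiceA.split k))
    · rw [if_neg hlt, if_neg hlt]
      exact ih hL' b1 b2

-- one cell of A's double loop
lemma pvCellStep_ok (cs : List Char) (ℓ i : Int) (hℓ : 2 ≤ ℓ) (hi : 0 ≤ i)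
    (hj : i + ℓ - 1 < (cs.length : Int))
    (st : (Int → Int → Int) × (Int → Int → Option PvChoiceA))
    (h1 : ∀ a b, st.1 a b =
      if b - a + 2 ≤ ℓ ∨ (b - a + 1 = ℓ ∧ a < i) then (pvV cs a b).1 else 0)
    (h2 : ∀ a b, st.2 a b =
      if b - a + 2 ≤ ℓ ∨ (b - a + 1 = ℓ ∧ a < i) then (pvV cs a b).2 else none) :
    (∀ a b, (pvCellStep cs ℓ st i).1 a b =
      if b - a + 2 ≤ ℓ ∨ (b - a + 1 = ℓ ∧ a < i + 1) then (pvV cs a b).1 else 0) ∧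
    (∀ a b, (pvCellStep cs ℓ st i).2 a b =
      if b - a + 2 ≤ ℓ ∨ (b - a + 1 = ℓ ∧ a < i + 1) then (pvV cs a b).2 else none) := by
  have hread1 : st.1 (i + 1) (i + ℓ - 1 - 1) = (pvV cs (i + 1) (i + ℓ - 1 - 1)).1 := by
    rw [h1, if_pos (by omega)]
  have hcell1 : st.1 i (i + ℓ - 1) = 0 := by rw [h1, if_neg (by omega)]
  have hcell2 : st.2 i (i + ℓ - 1) = none := by rw [h2, if_neg (by omega)]
  have hik : ∀ k, i ≤ k → k < i + ℓ - 1 → st.1 i k = (pvV cs i k).1 := by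
    intro k hk1 hk2; rw [h1, if_pos (by omega)]
  have hkj : ∀ k, i ≤ k → k < i + ℓ - 1 →
      st.1 (k + 1) (i + ℓ - 1) = (pvV cs (k + 1) (i + ℓ - 1)).1 := by
    intro k hk1 hk2; rw [h1, if_pos (by omega)]
  have hrng : ∀ k ∈ PySem.List.pyRange i (i + ℓ - 1) 1, i ≤ k ∧ k < i + ℓ - 1 := by
    intro k hk; rw [PySem.List.mem_pyRange_one] at hk; omega
  have hmain : pvCellStep cs ℓ st i =
      (pvUpd st.1 i (i + ℓ - 1) (pvV cs i (i + ℓ - 1)).1,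
       pvUpd st.2 i (i + ℓ - 1) (pvV cs i (i + ℓ - 1)).2) := by
    simp only [pvCellStep]
    rw [pvV_unfold cs i (i + ℓ - 1) hi hj (by omega)]
    by_cases hm : pvMatch (PySem.List.pyGetD cs i ' ') (PySem.List.pyGetD cs (i + ℓ - 1) ' ')
    · rw [if_pos hm, if_pos hm, hread1]
      exact pvKFoldA cs i (i + ℓ - 1) st.1 st.2 hik hkj _ hrng
        ((pvV cs (i + 1) (i + ℓ - 1 - 1)).1 + 2) (some (PvChoiceA.pair (i + 1) (i + ℓ - 1 - 1)))
    · rw [if_neg hm, if_neg hm]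
      have h1' := pvUpd_self st.1 i (i + ℓ - 1) 0 hcell1
      have h2' := pvUpd_self st.2 i (i + ℓ - 1) none hcell2
      calc (PySem.List.pyRange i (i + ℓ - 1) 1).foldl (pvKStepA i (i + ℓ - 1)) st
          = (PySem.List.pyRange i (i + ℓ - 1) 1).foldl (pvKStepA i (i + ℓ - 1))
              (pvUpd st.1 i (i + ℓ - 1) 0, pvUpd st.2 i (i + ℓ - 1) none) := by
            rw [h1', h2']
        _ = (pvUpd st.1 i (i + ℓ - 1)
              ((PySem.List.pyRange i (i + ℓ - 1) 1).foldl (pvKStep cs i (i + ℓ - 1))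
                ((0 : Int), (none : Option PvChoiceA))).1,
             pvUpd st.2 i (i + ℓ - 1)
              ((PySem.List.pyRange i (i + ℓ - 1) 1).foldl (pvKStep cs i (i + ℓ - 1))
                ((0 : Int), (none : Option PvChoiceA))).2) :=
            pvKFoldA cs i (i + ℓ - 1) st.1 st.2 hik hkj _ hrng 0 none
  have hc1 : (pvCellStep cs ℓ st i).1 =
      pvUpd st.1 i (i + ℓ - 1) (pvV cs i (i + ℓ - 1)).1 := congrArg Prod.fst hmain
  have hc2 : (pvCellStep cs ℓ st i).2 =
      pvUpd st.2 i (i + ℓ - 1) (pvV cs i (i + ℓ - 1)).2 := congrArg Prod.snd hmain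
  constructor
  · intro a b
    rw [hc1]
    by_cases hab : a = i ∧ b = i + ℓ - 1
    · obtain ⟨rfl, rfl⟩ := hab
      rw [pvUpd_same, if_pos (by omega)]
    · rw [pvUpd_other st.1 i (i + ℓ - 1) a b _ hab, h1 a b]
      by_cases hc : b - a + 2 ≤ ℓ ∨ (b - a + 1 = ℓ ∧ a < i)
      · rw [if_pos hc, if_pos (by omega)]
      · rw [if_neg hc, if_neg (by omega)]
  · intro a b
    rw [hc2]
    by_cases hab : a = i ∧ b = i + ℓ - 1
    · obtain ⟨rfl, rfl⟩ := hab
      rw [pvUpd_same, if_pos (by omega)]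
    · rw [pvUpd_other st.2 i (i + ℓ - 1) a b _ hab, h2 a b]
      by_cases hc : b - a + 2 ≤ ℓ ∨ (b - a + 1 = ℓ ∧ a < i)
      · rw [if_pos hc, if_pos (by omega)]
      · rw [if_neg hc, if_neg (by omega)]

-- the i-loop of A
lemma pvILoop_ok (cs : List Char) (ℓ : Int) (hℓ : 2 ≤ ℓ) (m : Nat)
    (hm : (m : Int) ≤ (cs.length : Int) - ℓ + 1)
    (st : (Int → Int → Int) × (Int → Int → Option PvChoiceA))
    (h1 : ∀ a b, st.1 a b =
      if b - a + 2 ≤ ℓ ∨ (b - a + 1 = ℓ ∧ a < 0) then (pvV cs a b).1 else 0)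
    (h2 : ∀ a b, st.2 a b =
      if b - a + 2 ≤ ℓ ∨ (b - a + 1 = ℓ ∧ a < 0) then (pvV cs a b).2 else none) :
    (∀ a b, ((PySem.List.pyRange 0 (m : Int) 1).foldl (pvCellStep cs ℓ) st).1 a b =
      if b - a + 2 ≤ ℓ ∨ (b - a + 1 = ℓ ∧ a < (m : Int)) then (pvV cs a b).1 else 0) ∧
    (∀ a b, ((PySem.List.pyRange 0 (m : Int) 1).foldl (pvCellStep cs ℓ) st).2 a b =
      if b - a + 2 ≤ ℓ ∨ (b - a + 1 = ℓ ∧ a < (m : Int)) then (pvV cs a b).2 else none) := by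
  induction m with
  | zero =>
    rw [PySem.List.pyRange_one_eq_nil (by simp)]
    simp only [List.foldl_nil, Nat.cast_zero]
    exact ⟨h1, h2⟩
  | succ m ih =>
    have hcast : ((m + 1 : ℕ) : ℤ) = (m : ℤ) + 1 := by push_cast; ring
    rw [hcast, PySem.List.pyRange_one_succ_right (by positivity), List.foldl_append,
      List.foldl_cons, List.foldl_nil]
    obtain ⟨ih1, ih2⟩ := ih (by omega)
    exact pvCellStep_ok cs ℓ (m : ℤ) hℓ (by positivity) (by omega) _ ih1 ih2

-- the length-loop of A
lemma pvLLoop_ok (cs : List Char) (m : Nat)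
    (hm : (2 + (m : Int)) ≤ (cs.length : Int) + 1)
    (st : (Int → Int → Int) × (Int → Int → Option PvChoiceA))
    (h1 : ∀ a b, st.1 a b = if b - a + 2 ≤ 2 then (pvV cs a b).1 else 0)
    (h2 : ∀ a b, st.2 a b = if b - a + 2 ≤ 2 then (pvV cs a b).2 else none) :
    (∀ a b, ((PySem.List.pyRange 2 (2 + (m : Int)) 1).foldl
        (pvLenStep cs (cs.length : Int)) st).1 a b =
      if b - a + 2 ≤ 2 + (m : Int) then (pvV cs a b).1 else 0) ∧
    (∀ a b, ((PySem.List.pyRange 2 (2 + (m : Int)) 1).foldl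
        (pvLenStep cs (cs.length : Int)) st).2 a b =
      if b - a + 2 ≤ 2 + (m : Int) then (pvV cs a b).2 else none) := by
  induction m with
  | zero =>
    rw [show ((2 : ℤ) + ((0 : ℕ) : ℤ)) = 2 by norm_num, PySem.List.pyRange_one_eq_nil (by omega)]
    simp only [List.foldl_nil]
    exact ⟨h1, h2⟩
  | succ m ih =>
    have hcast : ((m + 1 : ℕ) : ℤ) = (m : ℤ) + 1 := by push_cast; ring
    rw [hcast, show (2 : ℤ) + ((m : ℤ) + 1) = (2 + (m : ℤ)) + 1 by ring,
      PySem.List.pyRange_one_succ_right (by omega), List.foldl_append,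
      List.foldl_cons, List.foldl_nil]
    obtain ⟨ih1, ih2⟩ := ih (by omega)
    set prev := (PySem.List.pyRange 2 (2 + (m : Int)) 1).foldl
      (pvLenStep cs (cs.length : Int)) st with hprev
    -- starting tables for the i-loop at length ℓ = 2 + m
    have hs1 : ∀ a b, prev.1 a b =
        if b - a + 2 ≤ 2 + (m : Int) ∨ (b - a + 1 = 2 + (m : Int) ∧ a < 0) then
          (pvV cs a b).1 else 0 := by
      intro a b
      rw [ih1 a b]
      by_cases hc : b - a + 2 ≤ 2 + (m : Int)
      · rw [if_pos hc, if_pos (Or.inl hc)]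
      · rw [if_neg hc]
        by_cases hc2 : b - a + 1 = 2 + (m : Int) ∧ a < 0
        · rw [if_pos (Or.inr hc2), pvV_invalid cs a b (by omega)]
        · rw [if_neg (by tauto)]
    have hs2 : ∀ a b, prev.2 a b =
        if b - a + 2 ≤ 2 + (m : Int) ∨ (b - a + 1 = 2 + (m : Int) ∧ a < 0) then
          (pvV cs a b).2 else none := by
      intro a b
      rw [ih2 a b]
      by_cases hc : b - a + 2 ≤ 2 + (m : Int)
      · rw [if_pos hc, if_pos (Or.inl hc)]
      · rw [if_neg hc]
        by_cases hc2 : b - a + 1 = 2 + (m : Int) ∧ a < 0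
        · rw [if_pos (Or.inr hc2), pvV_invalid cs a b (by omega)]
        · rw [if_neg (by tauto)]
    have hMeq : ((((cs.length : Int) - (2 + (m : Int)) + 1).toNat : ℤ)) =
        (cs.length : Int) - (2 + (m : Int)) + 1 := by omega
    have hil := pvILoop_ok cs (2 + (m : Int)) (by omega)
      (((cs.length : Int) - (2 + (m : Int)) + 1).toNat) (by omega) prev hs1 hs2
    rw [hMeq] at hil
    obtain ⟨hil1, hil2⟩ := hil
    have hgoal1 : ∀ a b, (pvLenStep cs (cs.length : Int) prev (2 + (m : Int))).1 a b =
        if b - a + 2 ≤ 2 + ((m : ℤ) + 1) then (pvV cs a b).1 else 0 := by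
      intro a b
      show ((PySem.List.pyRange 0 ((cs.length : Int) - (2 + (m : Int)) + 1) 1).foldl
        (pvCellStep cs (2 + (m : Int))) prev).1 a b = _
      rw [hil1 a b]
      by_cases hc : b - a + 2 ≤ 2 + (m : Int) ∨
          (b - a + 1 = 2 + (m : Int) ∧ a < (cs.length : Int) - (2 + (m : Int)) + 1)
      · rw [if_pos hc, if_pos (by omega)]
      · by_cases hc2 : b - a + 2 ≤ 2 + ((m : ℤ) + 1)
        · rw [if_neg hc, if_pos hc2, pvV_invalid cs a b (by omega)]
        · rw [if_neg hc, if_neg hc2]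
    have hgoal2 : ∀ a b, (pvLenStep cs (cs.length : Int) prev (2 + (m : Int))).2 a b =
        if b - a + 2 ≤ 2 + ((m : ℤ) + 1) then (pvV cs a b).2 else none := by
      intro a b
      show ((PySem.List.pyRange 0 ((cs.length : Int) - (2 + (m : Int)) + 1) 1).foldl
        (pvCellStep cs (2 + (m : Int))) prev).2 a b = _
      rw [hil2 a b]
      by_cases hc : b - a + 2 ≤ 2 + (m : Int) ∨
          (b - a + 1 = 2 + (m : Int) ∧ a < (cs.length : Int) - (2 + (m : Int)) + 1)
      · rw [if_pos hc, if_pos (by omega)]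
      · by_cases hc2 : b - a + 2 ≤ 2 + ((m : ℤ) + 1)
        · rw [if_neg hc, if_pos hc2, pvV_invalid cs a b (by omega)]
        · rw [if_neg hc, if_neg hc2]
    exact ⟨hgoal1, hgoal2⟩

-- A's finished tables are exactly the spec tables
lemma pvTabs_ok (cs : List Char) :
    (PySem.List.pyRange 2 ((cs.length : Int) + 1) 1).foldl
        (pvLenStep cs (cs.length : Int)) ((fun _ _ => 0), (fun _ _ => none)) =
      ((fun a b => (pvV cs a b).1), (fun a b => (pvV cs a b).2)) := by
  by_cases hn : 2 ≤ (cs.length : Int)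
  · have h01 : ∀ a b, ((fun _ _ => (0 : Int)) : Int → Int → Int) a b =
        if b - a + 2 ≤ 2 then (pvV cs a b).1 else 0 := by
      intro a b
      by_cases hc : b - a + 2 ≤ 2
      · rw [if_pos hc, pvV_invalid cs a b (by omega)]
      · rw [if_neg hc]
    have h02 : ∀ a b, ((fun _ _ => (none : Option PvChoiceA)) :
        Int → Int → Option PvChoiceA) a b =
        if b - a + 2 ≤ 2 then (pvV cs a b).2 else none := by
      intro a b
      by_cases hc : b - a + 2 ≤ 2
      · rw [if_pos hc, pvV_invalid cs a b (by omega)]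
      · rw [if_neg hc]
    have hll := pvLLoop_ok cs (((cs.length : Int) - 1).toNat) (by omega)
      ((fun _ _ => 0), (fun _ _ => none)) h01 h02
    have hMeq : (2 : ℤ) + ((((cs.length : Int) - 1).toNat : ℕ) : ℤ) = (cs.length : Int) + 1 := by
      omega
    rw [hMeq] at hll
    obtain ⟨hll1, hll2⟩ := hll
    refine Prod.ext ?_ ?_
    · funext a b
      show _ = (pvV cs a b).1
      rw [hll1 a b]
      by_cases hc : b - a + 2 ≤ (cs.length : Int) + 1
      · rw [if_pos hc]
      · rw [if_neg hc, pvV_invalid cs a b (by omega)]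
    · funext a b
      show _ = (pvV cs a b).2
      rw [hll2 a b]
      by_cases hc : b - a + 2 ≤ (cs.length : Int) + 1
      · rw [if_pos hc]
      · rw [if_neg hc, pvV_invalid cs a b (by omega)]
  · rw [PySem.List.pyRange_one_eq_nil (by omega)]
    simp only [List.foldl_nil]
    refine Prod.ext ?_ ?_
    · funext a b
      show (0 : Int) = (pvV cs a b).1
      rw [pvV_invalid cs a b (by omega)]
    · funext a b
      show (none : Option PvChoiceA) = (pvV cs a b).2
      rw [pvV_invalid cs a b (by omega)]

-- ----- B side -----

def pvMapC : Option PvChoiceA → Option PvChoiceB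
  | none => none
  | some (PvChoiceA.pair _ _) => some PvChoiceB.pair
  | some (PvChoiceA.split k) => some (PvChoiceB.split k)

def pvBV (cs : List Char) (i j : Int) : Int × Option PvChoiceB :=
  ((pvV cs i j).1, pvMapC (pvV cs i j).2)

def pvInv (cs : List Char) (memo : PySem.Dict (Int × Int) (Int × Option PvChoiceB)) : Prop :=
  ∀ p v, PySem.Dict.get? memo p = some v → v = pvBV cs p.1 p.2

lemma pvSolveB_ok (cs : List Char) :
    ∀ (fuel : Nat) (i j : Int) memo, 0 < fuel →
      ((j - i).toNat < fuel ∨ i < 0 ∨ (cs.length : Int) ≤ j) → pvInv cs memo →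
      (pvSolveB cs (cs.length : Int) fuel memo i j).1 = pvBV cs i j ∧
      pvInv cs (pvSolveB cs (cs.length : Int) fuel memo i j).2 := by
  intro fuel
  induction fuel with
  | zero => intro i j memo h0; omega
  | succ f ih =>
    intro i j memo _ hd hInv
    by_cases hg : i < 0 ∨ (cs.length : Int) ≤ j ∨ j ≤ i
    · constructor
      · simp only [pvSolveB, if_pos hg, pvBV, pvV_invalid cs i j hg, pvMapC]
      · simp only [pvSolveB, if_pos hg]; exact hInv
    · have hd' : (j - i).toNat < f + 1 := by
        rcases hd with h | h | h
        · exact h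
        · omega
        · omega
      have hij : i < j := by omega
      have hf0 : 0 < f := by omega
      simp only [pvSolveB, if_neg hg]
      cases hget : PySem.Dict.get? memo (i, j) with
      | some v =>
        exact ⟨hInv (i, j) v hget, hInv⟩
      | none =>
        have kfold : ∀ (L : List Int), (∀ k ∈ L, i ≤ k ∧ k < j) →
            ∀ (b1 : Int) (b2 : Option PvChoiceA)
              (m : PySem.Dict (Int × Int) (Int × Option PvChoiceB)), pvInv cs m →
            (L.foldl (fun st k =>
                let ra := pvSolveB cs (cs.length : Int) f st.2 i k
                let rb := pvSolveB cs (cs.length : Int) f ra.2 (k + 1) j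
                let s := ra.1.1 + rb.1.1
                if st.1.1 < s then ((s, some (PvChoiceB.split k)), rb.2) else (st.1, rb.2))
              ((b1, pvMapC b2), m)).1 =
              ((L.foldl (pvKStep cs i j) (b1, b2)).1,
               pvMapC (L.foldl (pvKStep cs i j) (b1, b2)).2) ∧
            pvInv cs (L.foldl (fun st k =>
                let ra := pvSolveB cs (cs.length : Int) f st.2 i k
                let rb := pvSolveB cs (cs.length : Int) f ra.2 (k + 1) j
                let s := ra.1.1 + rb.1.1
                if st.1.1 < s then ((s, some (PvChoiceB.split k)), rb.2) else (st.1, rb.2))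
              ((b1, pvMapC b2), m)).2 := by
          intro L
          induction L with
          | nil => intro _ b1 b2 m hm'; exact ⟨rfl, hm'⟩
          | cons k L ihL =>
            intro hL b1 b2 m hm'
            have hk : i ≤ k ∧ k < j := hL k List.mem_cons_self
            have hL' : ∀ x ∈ L, i ≤ x ∧ x < j :=
              fun x hx => hL x (List.mem_cons_of_mem k hx)
            obtain ⟨ha1, ha2⟩ := ih i k m hf0 (Or.inl (by omega)) hm'
            obtain ⟨hb1, hb2⟩ :=
              ih (k + 1) j (pvSolveB cs (cs.length : Int) f m i k).2 hf0
                (Or.inl (by omega)) ha2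
            rw [List.foldl_cons, List.foldl_cons]
            simp only [ha1, hb1, pvBV, pvKStep]
            by_cases hlt : b1 < (pvV cs i k).1 + (pvV cs (k + 1) j).1
            · rw [if_pos hlt, if_pos hlt]
              exact ihL hL' ((pvV cs i k).1 + (pvV cs (k + 1) j).1)
                (some (PvChoiceA.split k)) _ hb2
            · rw [if_neg hlt, if_neg hlt]
              exact ihL hL' b1 b2 _ hb2
        have hrng : ∀ k ∈ PySem.List.pyRange i j 1, i ≤ k ∧ k < j := by
          intro k hk; rw [PySem.List.mem_pyRange_one] at hk; omega
        by_cases hm : pvMatch (PySem.List.pyGetD cs i ' ') (PySem.List.pyGetD cs j ' ')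
        · rw [if_pos hm]
          obtain ⟨hp1, hp2⟩ := ih (i + 1) (j - 1) memo hf0 (Or.inl (by omega)) hInv
          rw [hp1]
          obtain ⟨hk1, hk2⟩ := kfold (PySem.List.pyRange i j 1) hrng
            ((pvV cs (i + 1) (j - 1)).1 + 2) (some (PvChoiceA.pair (i + 1) (j - 1)))
            (pvSolveB cs (cs.length : Int) f memo (i + 1) (j - 1)).2 hp2
          have hbf : (PySem.List.pyRange i j 1).foldl (pvKStep cs i j)
              ((pvV cs (i + 1) (j - 1)).1 + 2, some (PvChoiceA.pair (i + 1) (j - 1))) =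
              pvV cs i j := by
            rw [pvV_unfold cs i j (by omega) (by omega) hij, if_pos hm]
          have hval : ((PySem.List.pyRange i j 1).foldl (pvKStep cs i j)
                ((pvV cs (i + 1) (j - 1)).1 + 2, some (PvChoiceA.pair (i + 1) (j - 1)))).1 =
                (pvV cs i j).1 := by rw [hbf]
          have hch : pvMapC ((PySem.List.pyRange i j 1).foldl (pvKStep cs i j)
                ((pvV cs (i + 1) (j - 1)).1 + 2, some (PvChoiceA.pair (i + 1) (j - 1)))).2 =
                pvMapC (pvV cs i j).2 := by rw [hbf]
          have hres : ((pvV cs i j).1, pvMapC (pvV cs i j).2) = pvBV cs i j := rfl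
          have hk1' := hk1.trans (by rw [hval, hch, hres] :
            (((PySem.List.pyRange i j 1).foldl (pvKStep cs i j)
                ((pvV cs (i + 1) (j - 1)).1 + 2, some (PvChoiceA.pair (i + 1) (j - 1)))).1,
              pvMapC ((PySem.List.pyRange i j 1).foldl (pvKStep cs i j)
                ((pvV cs (i + 1) (j - 1)).1 + 2,
                  some (PvChoiceA.pair (i + 1) (j - 1)))).2) = pvBV cs i j)
          constructor
          · exact hk1'
          · intro p v hv
            rw [PySem.Dict.get?_insert] at hv
            by_cases hp : p = (i, j)
            · rw [if_pos hp] at hv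
              injection hv with hv'
              subst hp
              rw [← hv']
              exact hk1'
            · rw [if_neg hp] at hv
              exact hk2 p v hv
        · rw [if_neg hm]
          obtain ⟨hk1, hk2⟩ := kfold (PySem.List.pyRange i j 1) hrng 0 none memo hInv
          have hbf : (PySem.List.pyRange i j 1).foldl (pvKStep cs i j)
              ((0 : Int), (none : Option PvChoiceA)) = pvV cs i j := by
            rw [pvV_unfold cs i j (by omega) (by omega) hij, if_neg hm]
          have hval : ((PySem.List.pyRange i j 1).foldl (pvKStep cs i j)
                ((0 : Int), (none : Option PvChoiceA))).1 = (pvV cs i j).1 := by rw [hbf]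
          have hch : pvMapC ((PySem.List.pyRange i j 1).foldl (pvKStep cs i j)
                ((0 : Int), (none : Option PvChoiceA))).2 = pvMapC (pvV cs i j).2 := by
            rw [hbf]
          have hres : ((pvV cs i j).1, pvMapC (pvV cs i j).2) = pvBV cs i j := rfl
          have hk1' := hk1.trans (by rw [hval, hch, hres] :
            (((PySem.List.pyRange i j 1).foldl (pvKStep cs i j)
                ((0 : Int), (none : Option PvChoiceA))).1,
              pvMapC ((PySem.List.pyRange i j 1).foldl (pvKStep cs i j)
                ((0 : Int), (none : Option PvChoiceA))).2) = pvBV cs i j)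
          constructor
          · exact hk1'
          · intro p v hv
            rw [PySem.Dict.get?_insert] at hv
            by_cases hp : p = (i, j)
            · rw [if_pos hp] at hv
              injection hv with hv'
              subst hp
              rw [← hv']
              exact hk1'
            · rw [if_neg hp] at hv
              exact hk2 p v hv

lemma pvReconB_ok (cs : List Char) :
    ∀ (fuel : Nat) (l r : Int) memo, pvInv cs memo →
      (pvReconB cs (cs.length : Int) fuel memo l r).1 =
        pvReconA cs (fun a b => (pvV cs a b).2) fuel l r ∧
      pvInv cs (pvReconB cs (cs.length : Int) fuel memo l r).2 := by
  intro fuel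
  induction fuel with
  | zero => intro l r memo h; exact ⟨rfl, h⟩
  | succ f ihf =>
    intro l r memo hInv
    by_cases hlr : r < l
    · simp only [pvReconB, pvReconA, if_pos hlr]
      exact ⟨trivial, hInv⟩
    · simp only [pvReconB, pvReconA, if_neg hlr]
      have hdisj : (r - l).toNat < (cs.length : Int).toNat + 1 ∨ l < 0 ∨
          (cs.length : Int) ≤ r := by omega
      obtain ⟨hs1, hs2⟩ := pvSolveB_ok cs ((cs.length : Int).toNat + 1) l r memo
        (Nat.succ_pos _) hdisj hInv
      rw [hs1]
      cases hc : (pvV cs l r).2 with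
      | none =>
        simp only [pvBV, hc, pvMapC]
        exact ⟨trivial, hs2⟩
      | some ch =>
        cases ch with
        | pair a b =>
          obtain ⟨ha, hb⟩ := pvV_pair_eq cs l r a b hc
          subst ha; subst hb
          simp only [pvBV, hc, pvMapC]
          obtain ⟨hr1, hr2⟩ := ihf (l + 1) (r - 1)
            (pvSolveB cs (cs.length : Int) ((cs.length : Int).toNat + 1) memo l r).2 hs2
          constructor
          · rw [hr1]
          · exact hr2
        | split k =>
          simp only [pvBV, hc, pvMapC]
          obtain ⟨hr1, hr2⟩ := ihf l k
            (pvSolveB cs (cs.length : Int) ((cs.length : Int).toNat + 1) memo l r).2 hs2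
          obtain ⟨hq1, hq2⟩ := ihf (k + 1) r
            (pvReconB cs (cs.length : Int) f
              (pvSolveB cs (cs.length : Int) ((cs.length : Int).toNat + 1) memo l r).2 l k).2 hr2
          constructor
          · rw [hr1, hq1]
          · exact hq2

-- ===== VERDICT (by name: the statement is the Claim_ definition above) =====
theorem max_valid_bracket_sequence_spec : Claim_equal_max_valid_bracket_sequence := by
  intro brackets _
  unfold Spec_max_valid_bracket_sequence
  unfold max_valid_bracket_sequence max_valid_bracket_sequence_alt
  simp only [PySem.Str.len_eq]
  rw [pvTabs_ok brackets.toList]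
  have hInv0 : pvInv brackets.toList PySem.Dict.empty := by
    intro p v hv
    rw [PySem.Dict.get?_empty] at hv
    cases hv
  have h := pvReconB_ok brackets.toList (((brackets.toList.length : Int)).toNat + 1) 0
    ((brackets.toList.length : Int) - 1) PySem.Dict.empty hInv0
  rw [h.1]
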